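-- pv_equiv track=rewrite | github.com/MichaelPay/VeevaVaultMCP | notebook_tests/batch_notebook_executor.py | categorize_notebook
-- ===== SOURCE A (Python) =====
-- def categorize_notebook(notebook_name: str) -> str:
--     """Categorize notebook by name pattern."""
--     name_lower = notebook_name.lower()
--
--     if any(x in name_lower for x in ['01_', '02_', '03_', '04_', '05_']):
--         return 'Core API'
--     elif any(x in name_lower for x in ['06_', '07_', '08_', '09_', '10_']):
--         return 'Document & Object Management'
--     elif any(x in name_lower for x in ['11_', '12_', '13_', '14_', '15_']):
--         return 'System Management'
--     elif any(x in name_lower for x in ['16_', '17_', '18_', '19_', '20_']):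
--         return 'Configuration & Security'
--     elif any(x in name_lower for x in ['21_', '22_', '23_', '24_', '25_', '26_', '27_']):
--         return 'Advanced Services'
--     elif 'baseline' in name_lower:
--         return 'Baseline Testing'
--     else:
--         return 'Other'
-- ===== SOURCE B (Python) =====
-- def categorize_notebook(notebook_name: str) -> str:
--     """Categorize notebook by name pattern (single character-window scan).
--
--     Scans the lowered name once for digit-digit-underscore windows,
--     keeps the smallest number in 1..27 found, and maps it to its category;
--     this equals A's chained group checks because A's answer is the category
--     of the smallest such token present.
--     """
--     s = notebook_name.lower()
--     best = None
--     for i in range(len(s) - 2):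
--         c0, c1, c2 = s[i], s[i + 1], s[i + 2]
--         if '0' <= c0 <= '9' and '0' <= c1 <= '9' and c2 == '_':
--             n = 10 * (ord(c0) - 48) + (ord(c1) - 48)
--             if 1 <= n <= 27 and (best is None or n < best):
--                 best = n
--     if best is None:
--         return 'Baseline Testing' if 'baseline' in s else 'Other'
--     if best <= 5:
--         return 'Core API'
--     if best <= 10:
--         return 'Document & Object Management'
--     if best <= 15:
--         return 'System Management'
--     if best <= 20:
--         return 'Configuration & Security'
--     return 'Advanced Services'
-- ===== Notes on version B (the rewrite author's own statement) =====
-- stated objective: alternative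
-- what changed: Instead of testing each of the 27 tokens against the string with chained any() membership checks, B slides a 3-character window over the string once, parses every digit-digit-underscore occurrence into its number, keeps the minimum in 1..27, and maps that minimum through range thresholds; correct because A's answer is the category of the smallest token present.
import Mathlib
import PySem

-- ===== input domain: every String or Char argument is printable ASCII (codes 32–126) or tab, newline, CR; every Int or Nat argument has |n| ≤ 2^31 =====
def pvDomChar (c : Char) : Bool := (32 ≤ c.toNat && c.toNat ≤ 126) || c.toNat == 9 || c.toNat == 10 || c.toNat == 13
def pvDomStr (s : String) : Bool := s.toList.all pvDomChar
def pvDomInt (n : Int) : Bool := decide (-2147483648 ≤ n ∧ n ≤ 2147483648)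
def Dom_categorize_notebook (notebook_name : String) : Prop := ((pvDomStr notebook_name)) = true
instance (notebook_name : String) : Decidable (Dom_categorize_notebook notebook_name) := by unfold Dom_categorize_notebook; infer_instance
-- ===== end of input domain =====

-- B replaces A's 27 chained substring-membership tests with one 3-character-window
-- scan of the string that keeps the smallest number 1..27 seen as 'dd_' and maps it
-- through range thresholds (objective: alternative).

-- ===== PORT A =====
def categorize_notebook (notebook_name : String) : String :=
  let name_lower := PySem.Str.lower notebook_name
  if ["01_", "02_", "03_", "04_", "05_"].any (fun x => PySem.Str.isIn x name_lower) then
    "Core API"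
  else if ["06_", "07_", "08_", "09_", "10_"].any (fun x => PySem.Str.isIn x name_lower) then
    "Document & Object Management"
  else if ["11_", "12_", "13_", "14_", "15_"].any (fun x => PySem.Str.isIn x name_lower) then
    "System Management"
  else if ["16_", "17_", "18_", "19_", "20_"].any (fun x => PySem.Str.isIn x name_lower) then
    "Configuration & Security"
  else if ["21_", "22_", "23_", "24_", "25_", "26_", "27_"].any (fun x => PySem.Str.isIn x name_lower) then
    "Advanced Services"
  else if PySem.Str.isIn "baseline" name_lower then
    "Baseline Testing"
  else
    "Other"

-- ===== PORT B =====
-- '0' <= c <= '9'  (Python's single-char string comparison = code-point order)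
def pvIsDig (c : Char) : Bool := decide ('0' ≤ c) && decide (c ≤ '9')

-- the loop body: if the window is 'dd_' with value 1..27, take the min with best
def pvStep (best : Option Int) (c0 c1 c2 : Char) : Option Int :=
  if pvIsDig c0 && pvIsDig c1 && (c2 == '_') then
    let n : Int := 10 * ((c0.toNat : Int) - 48) + ((c1.toNat : Int) - 48)
    if 1 ≤ n ∧ n ≤ 27 then
      match best with
      | none => some n
      | some m => if n < m then some n else some m
    else best
  else best

-- the for-loop over all 3-character windows (i = 0 .. len-3)
def pvScan : List Char → Option Int → Option Int
  | c0 :: c1 :: c2 :: t, best => pvScan (c1 :: c2 :: t) (pvStep best c0 c1 c2)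
  | _, best => best

def categorize_notebook_alt (notebook_name : String) : String :=
  let s := PySem.Str.lower notebook_name
  match pvScan s.toList none with
  | none => if PySem.Str.isIn "baseline" s then "Baseline Testing" else "Other"
  | some best =>
    if best ≤ 5 then "Core API"
    else if best ≤ 10 then "Document & Object Management"
    else if best ≤ 15 then "System Management"
    else if best ≤ 20 then "Configuration & Security"
    else "Advanced Services"

-- ===== PRECONDITION & SPEC =====
def Spec_categorize_notebook (notebook_name : String) (out : String) : Prop := out = categorize_notebook_alt notebook_name
instance (notebook_name : String) (out : String) : Decidable (Spec_categorize_notebook notebook_name out) := by unfold Spec_categorize_notebook; infer_instance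

-- ===== CLAIM (what is proved, stated in full; the proofs are below) =====
def Claim_equal_categorize_notebook : Prop := ∀ (notebook_name : String), Dom_categorize_notebook notebook_name → Spec_categorize_notebook notebook_name (categorize_notebook notebook_name)

-- ===== LEMMAS AND PROOFS =====

-- the token 'dd_' whose number is m
def pvTok (m : Int) : List Char :=
  [Char.ofNat (48 + m.toNat / 10), Char.ofNat (48 + m.toNat % 10), '_']

-- min update as a binary operation (what pvStep does when the guard holds)
def pvMin (best : Option Int) (n : Int) : Option Int :=
  match best with
  | none => some n
  | some m => if n < m then some n else some m

-- the list of values of all in-range 'dd_' windows, in scan order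
def pvHits : List Char → List Int
  | c0 :: c1 :: c2 :: t =>
      (if pvIsDig c0 && pvIsDig c1 && (c2 == '_') &&
          decide (1 ≤ 10 * ((c0.toNat : Int) - 48) + ((c1.toNat : Int) - 48) ∧
                  10 * ((c0.toNat : Int) - 48) + ((c1.toNat : Int) - 48) ≤ 27)
       then [10 * ((c0.toNat : Int) - 48) + ((c1.toNat : Int) - 48)] else []) ++ pvHits (c1 :: c2 :: t)
  | _ => []

theorem pvScan_eq_foldl (l : List Char) (b : Option Int) :
    pvScan l b = List.foldl pvMin b (pvHits l) := by
  induction l generalizing b with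
  | nil => rfl
  | cons c0 t ih =>
    match t with
    | [] => rfl
    | [c1] => rfl
    | c1 :: c2 :: t' =>
      rw [pvScan, pvHits, ih, List.foldl_append]
      congr 1
      by_cases h1 : (pvIsDig c0 && pvIsDig c1 && (c2 == '_')) = true
      · by_cases h2 : (1 ≤ 10 * ((c0.toNat : Int) - 48) + ((c1.toNat : Int) - 48) ∧
                       10 * ((c0.toNat : Int) - 48) + ((c1.toNat : Int) - 48) ≤ 27)
        · simp [pvStep, pvMin, h1, h2]
        · simp [pvStep, h1, h2]
      · simp [pvStep, h1]

theorem pvFoldl_some_spec (xs : List Int) (m : Int) :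
    ∃ r, List.foldl pvMin (some m) xs = some r ∧ (r = m ∨ r ∈ xs) ∧ r ≤ m ∧ ∀ k ∈ xs, r ≤ k := by
  induction xs generalizing m with
  | nil => exact ⟨m, rfl, Or.inl rfl, le_refl _, by simp⟩
  | cons a t ih =>
    by_cases h : a < m
    · obtain ⟨r, hr, hmem, hle, hmin⟩ := ih a
      refine ⟨r, ?_, ?_, by omega, ?_⟩
      · simpa [pvMin, h] using hr
      · rcases hmem with h' | h' <;> simp [h']
      · intro k hk; rcases List.mem_cons.mp hk with h' | hk
        · omega
        · exact hmin _ hk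
    · obtain ⟨r, hr, hmem, hle, hmin⟩ := ih m
      refine ⟨r, ?_, ?_, hle, ?_⟩
      · simpa [pvMin, h] using hr
      · rcases hmem with h' | h' <;> simp [h']
      · intro k hk; rcases List.mem_cons.mp hk with h' | hk
        · omega
        · exact hmin _ hk

theorem pvFoldl_none_iff (xs : List Int) :
    List.foldl pvMin none xs = none ↔ xs = [] := by
  cases xs with
  | nil => simp
  | cons a t =>
    simp only [List.foldl_cons, pvMin]
    obtain ⟨r, hr, _, _, _⟩ := pvFoldl_some_spec t a
    simp [hr]

theorem pvFoldl_none_spec (xs : List Int) (m : Int)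
    (h : List.foldl pvMin none xs = some m) : m ∈ xs ∧ ∀ k ∈ xs, m ≤ k := by
  cases xs with
  | nil => simp at h
  | cons a t =>
    simp only [List.foldl_cons, pvMin] at h
    obtain ⟨r, hr, hmem, hle, hmin⟩ := pvFoldl_some_spec t a
    rw [hr] at h
    injection h with h
    subst h
    constructor
    · rcases hmem with h' | h' <;> simp [h']
    · intro k hk; rcases List.mem_cons.mp hk with h' | hk
      · omega
      · exact hmin _ hk

theorem pvChar_toNat_ofNat {n : Nat} (h : n < 55296) : (Char.ofNat n).toNat = n := by
  rw [Char.toNat_ofNat, if_pos (Or.inl h)]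

theorem pvIsDig_iff (c : Char) : pvIsDig c = true ↔ 48 ≤ c.toNat ∧ c.toNat ≤ 57 := by
  simp only [pvIsDig, Bool.and_eq_true, decide_eq_true_eq]
  constructor
  · rintro ⟨h1, h2⟩
    exact ⟨h1, h2⟩
  · rintro ⟨h1, h2⟩
    exact ⟨h1, h2⟩

theorem pvTok_window (c0 c1 c2 : Char) (m : Int) (h1 : 1 ≤ m) (h2 : m ≤ 27) :
    pvTok m = [c0, c1, c2] ↔
      (pvIsDig c0 && pvIsDig c1 && (c2 == '_')) = true ∧
      m = 10 * ((c0.toNat : Int) - 48) + ((c1.toNat : Int) - 48) := by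
  have hv0 : 48 + m.toNat / 10 < 55296 := by omega
  have hv1 : 48 + m.toNat % 10 < 55296 := by omega
  constructor
  · intro h
    simp only [pvTok, List.cons.injEq, and_true] at h
    obtain ⟨e0, e1, e2⟩ := h
    have t0 : c0.toNat = 48 + m.toNat / 10 := by rw [← e0]; exact pvChar_toNat_ofNat hv0
    have t1 : c1.toNat = 48 + m.toNat % 10 := by rw [← e1]; exact pvChar_toNat_ofNat hv1
    refine ⟨?_, ?_⟩
    · simp only [Bool.and_eq_true, beq_iff_eq, pvIsDig_iff]
      exact ⟨⟨⟨by omega, by omega⟩, ⟨by omega, by omega⟩⟩, e2.symm⟩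
    · have := Nat.div_add_mod m.toNat 10
      omega
  · rintro ⟨hg, hm⟩
    simp only [Bool.and_eq_true, beq_iff_eq, pvIsDig_iff] at hg
    obtain ⟨⟨⟨d0l, d0u⟩, ⟨d1l, d1u⟩⟩, hu⟩ := hg
    have hq : m.toNat / 10 = c0.toNat - 48 ∧ m.toNat % 10 = c1.toNat - 48 := by
      have := Nat.div_add_mod m.toNat 10
      have h10 : m.toNat % 10 < 10 := Nat.mod_lt _ (by omega)
      omega
    simp only [pvTok, List.cons.injEq, and_true]
    refine ⟨?_, ?_, hu.symm⟩
    · have : Char.ofNat (48 + m.toNat / 10) = Char.ofNat c0.toNat := by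
        congr 1; omega
      rw [this, Char.ofNat_toNat]
    · have : Char.ofNat (48 + m.toNat % 10) = Char.ofNat c1.toNat := by
        congr 1; omega
      rw [this, Char.ofNat_toNat]

theorem pvMem_hits (l : List Char) (m : Int) :
    m ∈ pvHits l ↔ 1 ≤ m ∧ m ≤ 27 ∧ pvTok m <:+: l := by
  induction l with
  | nil =>
    simp only [pvHits, List.not_mem_nil, false_iff]
    rintro ⟨-, -, h⟩
    have := h.length_le
    simp [pvTok] at this
  | cons c0 t ih =>
    match t with
    | [] =>
      simp only [pvHits, List.not_mem_nil, false_iff]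
      rintro ⟨-, -, h⟩
      have := h.length_le
      simp [pvTok] at this
    | [c1] =>
      simp only [pvHits, List.not_mem_nil, false_iff]
      rintro ⟨-, -, h⟩
      have := h.length_le
      simp [pvTok] at this
    | c1 :: c2 :: t' =>
      rw [pvHits]
      simp only [List.mem_append, ih, List.infix_cons_iff]
      constructor
      · rintro (hin | ⟨h1, h2, h3⟩)
        · by_cases hg : (pvIsDig c0 && pvIsDig c1 && (c2 == '_')) = true
          · by_cases hr : (1 ≤ 10 * ((c0.toNat : Int) - 48) + ((c1.toNat : Int) - 48) ∧
                           10 * ((c0.toNat : Int) - 48) + ((c1.toNat : Int) - 48) ≤ 27)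
            · simp [hg, hr] at hin
              subst hin
              refine ⟨hr.1, hr.2, Or.inl ?_⟩
              have := (pvTok_window c0 c1 c2 _ hr.1 hr.2).mpr ⟨hg, rfl⟩
              rw [this]
              exact List.prefix_iff_eq_take.mpr (by simp)
            · simp [hg, hr] at hin
          · simp [hg] at hin
        · exact ⟨h1, h2, Or.inr h3⟩
      · rintro ⟨h1, h2, hpre | hinf⟩
        · left
          have hlen : pvTok m = [c0, c1, c2] := by
            have h3 : (3 : Nat) ≤ (c0 :: c1 :: c2 :: t').length := by simp
            have := List.prefix_iff_eq_take.mp hpre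
            simp only [pvTok] at this ⊢
            rw [this]
            rfl
          obtain ⟨hg, hm⟩ := (pvTok_window c0 c1 c2 m h1 h2).mp hlen
          rw [hm] at h1 h2 ⊢
          simp [hg, h1, h2]
        · right; exact ⟨h1, h2, hinf⟩

theorem pvIsIn_eq_decide (sub s : String) :
    PySem.Str.isIn sub s = decide (sub.toList <:+: s.toList) := by
  by_cases h : sub.toList <:+: s.toList
  · rw [decide_eq_true h]
    simpa [PySem.Str.isIn] using (PySem.Chars.isIn_iff_infix sub.toList s.toList).mpr h
  · rw [decide_eq_false h]
    cases hb : PySem.Str.isIn sub s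
    · rfl
    · refine absurd ((PySem.Chars.isIn_iff_infix sub.toList s.toList).mp ?_) h
      simpa [PySem.Str.isIn] using hb

theorem pvTokEq1 : ("01_" : String).toList = pvTok 1 := by decide
theorem pvTokEq2 : ("02_" : String).toList = pvTok 2 := by decide
theorem pvTokEq3 : ("03_" : String).toList = pvTok 3 := by decide
theorem pvTokEq4 : ("04_" : String).toList = pvTok 4 := by decide
theorem pvTokEq5 : ("05_" : String).toList = pvTok 5 := by decide
theorem pvTokEq6 : ("06_" : String).toList = pvTok 6 := by decide
theorem pvTokEq7 : ("07_" : String).toList = pvTok 7 := by decide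
theorem pvTokEq8 : ("08_" : String).toList = pvTok 8 := by decide
theorem pvTokEq9 : ("09_" : String).toList = pvTok 9 := by decide
theorem pvTokEq10 : ("10_" : String).toList = pvTok 10 := by decide
theorem pvTokEq11 : ("11_" : String).toList = pvTok 11 := by decide
theorem pvTokEq12 : ("12_" : String).toList = pvTok 12 := by decide
theorem pvTokEq13 : ("13_" : String).toList = pvTok 13 := by decide
theorem pvTokEq14 : ("14_" : String).toList = pvTok 14 := by decide
theorem pvTokEq15 : ("15_" : String).toList = pvTok 15 := by decide
theorem pvTokEq16 : ("16_" : String).toList = pvTok 16 := by decide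
theorem pvTokEq17 : ("17_" : String).toList = pvTok 17 := by decide
theorem pvTokEq18 : ("18_" : String).toList = pvTok 18 := by decide
theorem pvTokEq19 : ("19_" : String).toList = pvTok 19 := by decide
theorem pvTokEq20 : ("20_" : String).toList = pvTok 20 := by decide
theorem pvTokEq21 : ("21_" : String).toList = pvTok 21 := by decide
theorem pvTokEq22 : ("22_" : String).toList = pvTok 22 := by decide
theorem pvTokEq23 : ("23_" : String).toList = pvTok 23 := by decide
theorem pvTokEq24 : ("24_" : String).toList = pvTok 24 := by decide
theorem pvTokEq25 : ("25_" : String).toList = pvTok 25 := by decide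
theorem pvTokEq26 : ("26_" : String).toList = pvTok 26 := by decide
theorem pvTokEq27 : ("27_" : String).toList = pvTok 27 := by decide

-- ===== VERDICT (by name: the statement is the Claim_ definition above) =====
theorem categorize_notebook_spec : Claim_equal_categorize_notebook := by
  intro s _
  unfold Spec_categorize_notebook categorize_notebook categorize_notebook_alt
  dsimp only []
  generalize PySem.Str.lower s = t
  rw [pvScan_eq_foldl]
  cases hscan : List.foldl pvMin none (pvHits t.toList) with
  | none =>
    have hnil := (pvFoldl_none_iff _).mp hscan
    have hno : ∀ m : Int, 1 ≤ m → m ≤ 27 → ¬ pvTok m <:+: t.toList := by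
      intro m h1 h2 hh
      have : m ∈ pvHits t.toList := (pvMem_hits _ _).mpr ⟨h1, h2, hh⟩
      rw [hnil] at this
      simp at this
    simp only [List.any_cons, List.any_nil, pvIsIn_eq_decide,
      pvTokEq1, pvTokEq2, pvTokEq3, pvTokEq4, pvTokEq5, pvTokEq6, pvTokEq7, pvTokEq8,
      pvTokEq9, pvTokEq10, pvTokEq11, pvTokEq12, pvTokEq13, pvTokEq14, pvTokEq15,
      pvTokEq16, pvTokEq17, pvTokEq18, pvTokEq19, pvTokEq20, pvTokEq21, pvTokEq22,
      pvTokEq23, pvTokEq24, pvTokEq25, pvTokEq26, pvTokEq27]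
    simp [hno]
  | some m =>
    obtain ⟨hmem, hmin⟩ := pvFoldl_none_spec _ _ hscan
    obtain ⟨h1, h2, ht⟩ := (pvMem_hits _ _).mp hmem
    have hno : ∀ k : Int, 1 ≤ k → k ≤ 27 → k < m → ¬ pvTok k <:+: t.toList := by
      intro k hk1 hk2 hkm hh
      have := hmin k ((pvMem_hits _ _).mpr ⟨hk1, hk2, hh⟩)
      omega
    simp only [List.any_cons, List.any_nil, pvIsIn_eq_decide,
      pvTokEq1, pvTokEq2, pvTokEq3, pvTokEq4, pvTokEq5, pvTokEq6, pvTokEq7, pvTokEq8,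
      pvTokEq9, pvTokEq10, pvTokEq11, pvTokEq12, pvTokEq13, pvTokEq14, pvTokEq15,
      pvTokEq16, pvTokEq17, pvTokEq18, pvTokEq19, pvTokEq20, pvTokEq21, pvTokEq22,
      pvTokEq23, pvTokEq24, pvTokEq25, pvTokEq26, pvTokEq27]
    interval_cases m <;> simp_all
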